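-- pv_equiv track=rewrite | github.com/anuragparvekar36-byte/My-Python-training | Python_training Progs/functions hello.py | calculate_love_score
-- ===== SOURCE A (Python) =====
-- def calculate_love_score(name1, name2):
--
--     combined_names = (name1 + name2).lower()
--     true_count = sum(combined_names.count(char) for char in "true")
--     love_count = sum(combined_names.count(char) for char in "love")
--     love_score = int(str(true_count) + str(love_count))
--     if (love_score < 10) or (love_score > 90):
--         return f"Your love score is {love_score}, you go together like coke and mentos."
--     elif 40 <= love_score <= 50:
--         return f"Your love score is {love_score}, you are alright together."
--     else:
--         return f"Your love score is {love_score}."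
-- ===== SOURCE B (Python) =====
-- def calculate_love_score(name1, name2):
--     true_count = 0
--     love_count = 0
--     for ch in (name1 + name2).lower():
--         if ch in {'t', 'r', 'u', 'e'}:
--             true_count += 1
--         if ch in {'l', 'o', 'v', 'e'}:
--             love_count += 1
--     love_score = int(str(true_count) + str(love_count))
--     if (love_score < 10) or (love_score > 90):
--         return f"Your love score is {love_score}, you go together like coke and mentos."
--     elif 40 <= love_score <= 50:
--         return f"Your love score is {love_score}, you are alright together."
--     else:
--         return f"Your love score is {love_score}."
-- ===== Notes on version B (the rewrite author's own statement) =====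
-- stated objective: simpler
-- what changed: Replaces A's eight full scans of the combined name (one str.count pass per pattern letter) by a single loop over the combined name that increments both counters via set membership; valid because each pattern's letters are distinct.
import Mathlib
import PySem

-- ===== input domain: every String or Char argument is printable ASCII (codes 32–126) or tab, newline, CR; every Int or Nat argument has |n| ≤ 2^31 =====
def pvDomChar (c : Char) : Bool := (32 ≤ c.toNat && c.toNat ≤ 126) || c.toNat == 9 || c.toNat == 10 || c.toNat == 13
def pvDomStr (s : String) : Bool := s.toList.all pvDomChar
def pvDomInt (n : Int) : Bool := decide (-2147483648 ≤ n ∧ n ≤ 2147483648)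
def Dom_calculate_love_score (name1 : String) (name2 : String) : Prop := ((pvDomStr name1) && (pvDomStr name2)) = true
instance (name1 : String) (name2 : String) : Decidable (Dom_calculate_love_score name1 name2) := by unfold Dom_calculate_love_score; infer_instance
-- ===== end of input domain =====

-- B replaces A's per-pattern-letter str.count scans by one pass over the combined name
-- testing set membership; objective: simpler.

-- ===== PORT A =====
-- int(str(t)+str(l)) always succeeds here (digit strings), so getD 0 is never the default.
def calculate_love_score (name1 : String) (name2 : String) : String :=
  let combined_names := PySem.Str.lower (name1 ++ name2)
  let true_count : Int :=
    ("true".toList.map (fun ch => (PySem.Str.count combined_names (String.ofList [ch]) : Int))).sum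
  let love_count : Int :=
    ("love".toList.map (fun ch => (PySem.Str.count combined_names (String.ofList [ch]) : Int))).sum
  let love_score : Int :=
    (PySem.Int.ofStr? (PySem.Int.toStr true_count ++ PySem.Int.toStr love_count)).getD 0
  if love_score < 10 ∨ love_score > 90 then
    "Your love score is " ++ PySem.Int.toStr love_score ++ ", you go together like coke and mentos."
  else if 40 ≤ love_score ∧ love_score ≤ 50 then
    "Your love score is " ++ PySem.Int.toStr love_score ++ ", you are alright together."
  else
    "Your love score is " ++ PySem.Int.toStr love_score ++ "."

-- ===== PORT B =====
def calculate_love_score_alt (name1 : String) (name2 : String) : String :=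
  let combined := PySem.Str.lower (name1 ++ name2)
  let counts : Int × Int :=
    combined.toList.foldl
      (fun (p : Int × Int) ch =>
        ((if ch ∈ (['t', 'r', 'u', 'e'] : List Char) then p.1 + 1 else p.1),
         (if ch ∈ (['l', 'o', 'v', 'e'] : List Char) then p.2 + 1 else p.2)))
      (0, 0)
  let love_score : Int :=
    (PySem.Int.ofStr? (PySem.Int.toStr counts.1 ++ PySem.Int.toStr counts.2)).getD 0
  if love_score < 10 ∨ love_score > 90 then
    "Your love score is " ++ PySem.Int.toStr love_score ++ ", you go together like coke and mentos."
  else if 40 ≤ love_score ∧ love_score ≤ 50 then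
    "Your love score is " ++ PySem.Int.toStr love_score ++ ", you are alright together."
  else
    "Your love score is " ++ PySem.Int.toStr love_score ++ "."

-- ===== PRECONDITION & SPEC =====
def Spec_calculate_love_score (name1 : String) (name2 : String) (out : String) : Prop := out = calculate_love_score_alt name1 name2
instance (name1 : String) (name2 : String) (out : String) : Decidable (Spec_calculate_love_score name1 name2 out) := by unfold Spec_calculate_love_score; infer_instance

-- ===== CLAIM (what is proved, stated in full; the proofs are below) =====
def Claim_equal_calculate_love_score : Prop := ∀ (name1 : String) (name2 : String), Dom_calculate_love_score name1 name2 → Spec_calculate_love_score name1 name2 (calculate_love_score name1 name2)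

-- ===== LEMMAS AND PROOFS =====

-- Chars.count.go on a one-character pattern counts occurrences of that character.
theorem go_single (c : Char) (l : List Char) : ∀ (fuel acc : Nat), l.length ≤ fuel →
    PySem.Chars.count.go [c] fuel l acc = acc + l.count c := by
  induction l with
  | nil =>
    intro fuel acc _
    cases fuel <;> simp [PySem.Chars.count.go]
  | cons h t ih =>
    intro fuel acc hf
    cases fuel with
    | zero => simp at hf
    | succ f =>
      rw [PySem.Chars.count.go.eq_def]
      simp only [List.isPrefixOf, List.length_cons] at *
      by_cases hch : c = h
      · subst hch
        simp only [BEq.rfl, Bool.true_and, if_true]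
        have hd : List.drop (([] : List Char).length + 1) (c :: t) = t := rfl
        rw [hd, ih f (acc + 1) (by omega), List.count_cons_self]
        omega
      · have hb : (c == h) = false := by simp [hch]
        rw [hb]
        rw [if_neg (by simp), ih f acc (by omega),
          List.count_cons_of_ne (by simpa using (fun e => hch e.symm))]

theorem count_single (s : String) (c : Char) :
    PySem.Str.count s (String.ofList [c]) = s.toList.count c := by
  rw [PySem.Str.count_eq]
  have h1 : (String.ofList [c]).toList = [c] := by simp
  rw [h1, PySem.Chars.count]
  simp only [List.isEmpty_cons, Bool.false_eq_true, if_false]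
  simpa using go_single c s.toList s.toList.length 0 le_rfl

-- B's single pass computes, for each pattern, the number of characters lying in it.
theorem foldl_pair (p q : Char → Prop) [DecidablePred p] [DecidablePred q]
    (l : List Char) : ∀ (a b : Int),
    l.foldl (fun (st : Int × Int) ch =>
        ((if p ch then st.1 + 1 else st.1), (if q ch then st.2 + 1 else st.2))) (a, b)
      = (a + l.countP (fun ch => decide (p ch)), b + l.countP (fun ch => decide (q ch))) := by
  induction l with
  | nil => intro a b; simp
  | cons h t ih =>
    intro a b
    simp only [List.foldl_cons, List.countP_cons, ih]
    by_cases hp : p h <;> by_cases hq : q h <;> simp [hp, hq, Prod.ext_iff] <;> omega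

-- Counting membership in x::xs splits off the count of x when x is not in xs.
theorem countP_split (x : Char) (xs : List Char) (hx : x ∉ xs) (l : List Char) :
    l.countP (fun ch => decide (ch ∈ x :: xs))
      = l.count x + l.countP (fun ch => decide (ch ∈ xs)) := by
  induction l with
  | nil => simp
  | cons h t ih =>
    simp only [List.countP_cons, List.count_cons, ih]
    by_cases hhx : h = x <;> by_cases hm : h ∈ xs <;> simp_all <;> omega

-- For a pattern with pairwise-distinct letters, counting membership in one pass
-- equals summing the per-letter counts.
theorem countP_mem_eq_sum (pat : List Char) (hnd : pat.Nodup) (l : List Char) :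
    (l.countP (fun ch => decide (ch ∈ pat)) : Int)
      = (pat.map (fun ch => (l.count ch : Int))).sum := by
  induction pat with
  | nil => simp
  | cons x xs ih =>
    rcases List.nodup_cons.mp hnd with ⟨hx, hxs⟩
    rw [countP_split x xs hx l]
    push_cast
    rw [ih hxs]
    simp

-- ===== VERDICT (by name: the statement is the Claim_ definition above) =====
theorem calculate_love_score_spec : Claim_equal_calculate_love_score := by
  intro name1 name2 _
  unfold Spec_calculate_love_score calculate_love_score calculate_love_score_alt
  simp only [count_single,
    foldl_pair (fun ch => ch ∈ (['t','r','u','e'] : List Char))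
               (fun ch => ch ∈ (['l','o','v','e'] : List Char)),
    countP_mem_eq_sum (['t','r','u','e'] : List Char) (by decide),
    countP_mem_eq_sum (['l','o','v','e'] : List Char) (by decide)]
  simp [List.map]
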